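-- pv_equiv track=rewrite | github.com/13226617889/Gobang | Gobang.py | OneIf2
-- ===== SOURCE A (Python) =====
-- WIDTH = 15
--
-- HEIGHT = 15
--
-- def isOnBoard(x, y):
--     return (x <= WIDTH - 1 and x >= 0) and (y <= HEIGHT - 1 and y >= 0)
--
-- def OneIf2(board, tile, xstart, ystart):
--     if board[xstart][ystart] != ' ' or not isOnBoard(xstart, ystart):
--         return False
--     for xdir, ydir in [[0, 1], [1, 1], [1, 0], [1, -1], [0, -1], [-1, -1], [-1, 0], [-1, 1]]:
--         x, y = xstart, ystart
--         x += -xdir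
--         y += -ydir
--         tileNumber = 0
--         if isOnBoard(x, y) and board[x][y] == ' ':
--             x, y = xstart, ystart
--             x += xdir
--             y += ydir
--             if isOnBoard(x, y) and board[x][y] == ' ':
--                 while isOnBoard(x, y):
--                     x += xdir
--                     y += ydir
--                     if isOnBoard(x, y) and board[x][y] == ' ':
--
--                         break
--                     if isOnBoard(x, y) and board[x][y] == tile:
--                         tileNumber += 1
--                         if isOnBoard(x + xdir, y + ydir) and tileNumber == 2 and board[x + xdir][y + ydir] == ' ':
--
--                             return True
--             if isOnBoard(x, y) and board[x][y] == tile: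
--                 x += xdir
--                 y += ydir
--                 if isOnBoard(x, y) and board[x][y] == ' ':
--                     x += xdir
--                     y += ydir
--                     if isOnBoard(x, y) and board[x][y] == tile:
--                         if isOnBoard(x + xdir, y + ydir) and board[x + xdir][y + ydir] == ' ':
--                             return True
-- ===== SOURCE B (Python) =====
-- WIDTH = 15
--
-- HEIGHT = 15
--
--
-- def isOnBoard(x, y):
--     return (x <= WIDTH - 1 and x >= 0) and (y <= HEIGHT - 1 and y >= 0)
--
--
-- def OneIf2(board, tile, xstart, ystart):
--     if board[xstart][ystart] != ' ' or not isOnBoard(xstart, ystart):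
--         return False
--
--     def get(x, y):
--         return board[x][y] if isOnBoard(x, y) else None
--
--     for dx, dy in [[0, 1], [1, 1], [1, 0], [1, -1], [0, -1], [-1, -1], [-1, 0], [-1, 1]]:
--         if get(xstart - dx, ystart - dy) != ' ':
--             continue
--         if get(xstart + dx, ystart + dy) == ' ':
--             # collect the open ray two steps out, up to the board edge
--             ray = []
--             x, y = xstart + 2 * dx, ystart + 2 * dy
--             while isOnBoard(x, y):
--                 ray.append(board[x][y])
--                 x, y = x + dx, y + dy
--             if ' ' in ray:
--                 sp = ray.index(' ')
--                 if sp >= 1 and ray[sp - 1] == tile and ray[:sp - 1].count(tile) == 1: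
--                     return True
--         else:
--             if (get(xstart + dx, ystart + dy) == tile
--                     and get(xstart + 2 * dx, ystart + 2 * dy) == ' '
--                     and get(xstart + 3 * dx, ystart + 3 * dy) == tile
--                     and get(xstart + 4 * dx, ystart + 4 * dy) == ' '):
--                 return True
--     return False
-- ===== Notes on version B (the rewrite author's own statement) =====
-- stated objective: alternative
-- what changed: Replaces A's stateful incremental walk (mutating x,y with a tile counter and a break-driven while loop) by a collect-then-match decomposition: a total get(x,y) accessor, the open ray gathered once as a list and judged by its first-space index and a slice count, plus one 4-cell read for the adjacent tile-gap-tile shape; Pre_ excludes the inputs where A returns None (patternless scans) or raises IndexError (boards smaller than the 15x15 it assumes), and the degenerate tile=' ' calls where the searched stone is the blank marker itself.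
-- outside the precondition, e.g. on OneIf2([[' ', ' '], [' ', ' ']], 'x', 0, 0): A returns None, B returns False
import Mathlib
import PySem

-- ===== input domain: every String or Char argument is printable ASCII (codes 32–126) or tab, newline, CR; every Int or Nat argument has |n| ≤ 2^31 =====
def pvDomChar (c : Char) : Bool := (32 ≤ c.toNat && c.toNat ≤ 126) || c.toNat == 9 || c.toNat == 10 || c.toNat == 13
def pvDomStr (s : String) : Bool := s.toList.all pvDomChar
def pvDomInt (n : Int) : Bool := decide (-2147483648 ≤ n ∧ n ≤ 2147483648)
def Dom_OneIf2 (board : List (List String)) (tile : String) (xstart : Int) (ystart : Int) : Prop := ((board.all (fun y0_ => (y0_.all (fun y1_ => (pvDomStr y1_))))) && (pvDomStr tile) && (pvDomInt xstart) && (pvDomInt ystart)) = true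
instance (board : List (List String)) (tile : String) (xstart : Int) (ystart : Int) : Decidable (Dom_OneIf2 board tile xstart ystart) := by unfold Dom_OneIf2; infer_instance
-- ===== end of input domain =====

-- B replaces A's stateful incremental walk (coordinate mutation + tile counter + break-driven while
-- loop) by a collect-then-match decomposition: gather the open ray as a list, judge it by its
-- first-space index and a slice count, and read the adjacent tile-gap-tile shape as four cells.
-- Objective: alternative (same cost; the board is bounded 15×15).

-- ===== PORT A =====
-- shared by both ports: the module helper isOnBoard and the raw board[x][y] access (both Pythons
-- index the board identically; the default "" is never reached on inputs admitted by Pre_)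
def isOnBoardL (x y : Int) : Bool := (decide (x ≤ 15 - 1) && decide (x ≥ 0)) && (decide (y ≤ 15 - 1) && decide (y ≥ 0))

def cellD (board : List (List String)) (x y : Int) : String :=
  ((PySem.List.pyGet? board x).bind (fun r => PySem.List.pyGet? r y)).getD ""

def dirsL : List (Int × Int) := [(0,1),(1,1),(1,0),(1,-1),(0,-1),(-1,-1),(-1,0),(-1,1)]

-- A's inner while loop: current position (x,y), counter n; returns (returned-True?, final x, final y).
-- Fuel 16 is a totality bound only: from an on-board position the loop leaves the 15×15 board in ≤ 15 steps.
def loopA (board : List (List String)) (tile : String) (dx dy : Int) :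
    Nat → Int → Int → Int → Bool × Int × Int
  | 0, x, y, _ => (false, x, y)
  | f + 1, x, y, n =>
    if isOnBoardL x y then
      let x' := x + dx
      let y' := y + dy
      if isOnBoardL x' y' && (cellD board x' y' == " ") then (false, x', y')
      else if isOnBoardL x' y' && (cellD board x' y' == tile) then
        if isOnBoardL (x' + dx) (y' + dy) && (n + 1 == 2) && (cellD board (x' + dx) (y' + dy) == " ") then
          (true, x', y')
        else loopA board tile dx dy f x' y' (n + 1)
      else loopA board tile dx dy f x' y' n
    else (false, x, y)

-- one iteration of A's direction loop
def dirBodyA (board : List (List String)) (tile : String) (xs ys dx dy : Int) : Bool :=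
  if isOnBoardL (xs - dx) (ys - dy) && (cellD board (xs - dx) (ys - dy) == " ") then
    let r :=
      if isOnBoardL (xs + dx) (ys + dy) && (cellD board (xs + dx) (ys + dy) == " ") then
        loopA board tile dx dy 16 (xs + dx) (ys + dy) 0
      else (false, xs + dx, ys + dy)
    if r.1 then true
    else
      let x := r.2.1
      let y := r.2.2
      if isOnBoardL x y && (cellD board x y == tile) then
        if isOnBoardL (x + dx) (y + dy) && (cellD board (x + dx) (y + dy) == " ") then
          if isOnBoardL (x + dx + dx) (y + dy + dy) && (cellD board (x + dx + dx) (y + dy + dy) == tile) then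
            isOnBoardL (x + dx + dx + dx) (y + dy + dy + dy) && (cellD board (x + dx + dx + dx) (y + dy + dy + dy) == " ")
          else false
        else false
      else false
  else false

def OneIf2 (board : List (List String)) (tile : String) (xstart : Int) (ystart : Int) : Bool :=
  match (PySem.List.pyGet? board xstart).bind (fun r => PySem.List.pyGet? r ystart) with
  | none => false  -- IndexError in Python; outside Pre_
  | some c =>
    if c != " " || !isOnBoardL xstart ystart then false
    else dirsL.any (fun d => dirBodyA board tile xstart ystart d.1 d.2)

-- ===== PORT B =====
-- get(x, y) of Source B
def getOpt (board : List (List String)) (x y : Int) : Option String :=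
  if isOnBoardL x y then some (cellD board x y) else none

-- the ray-collecting while loop of Source B (fuel 16 is a totality bound only, as for loopA)
def rayB (board : List (List String)) (dx dy : Int) : Nat → Int → Int → List String
  | 0, _, _ => []
  | f + 1, x, y =>
    if isOnBoardL x y then cellD board x y :: rayB board dx dy f (x + dx) (y + dy) else []

-- one iteration of Source B's direction loop
def dirBodyB (board : List (List String)) (tile : String) (xs ys dx dy : Int) : Bool :=
  if !(getOpt board (xs - dx) (ys - dy) == some " ") then false
  else if getOpt board (xs + dx) (ys + dy) == some " " then
    let ray := rayB board dx dy 16 (xs + 2 * dx) (ys + 2 * dy)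
    match PySem.List.index? ray " " with
    | some sp =>
      decide (1 ≤ sp) && (ray.getD (sp - 1) "" == tile)
        && (PySem.List.count (ray.take (sp - 1)) tile == 1)
    | none => false
  else
    (getOpt board (xs + dx) (ys + dy) == some tile)
      && (getOpt board (xs + 2 * dx) (ys + 2 * dy) == some " ")
      && (getOpt board (xs + 3 * dx) (ys + 3 * dy) == some tile)
      && (getOpt board (xs + 4 * dx) (ys + 4 * dy) == some " ")

def OneIf2_alt (board : List (List String)) (tile : String) (xstart : Int) (ystart : Int) : Bool :=
  match (PySem.List.pyGet? board xstart).bind (fun r => PySem.List.pyGet? r ystart) with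
  | none => false  -- IndexError in Python; outside Pre_
  | some c =>
    if c != " " || !isOnBoardL xstart ystart then false
    else dirsL.any (fun d => dirBodyB board tile xstart ystart d.1 d.2)

-- ===== PRECONDITION & SPEC =====
-- Declarative description of the threat pattern A scans for, read directly off the cells (used
-- only to state Pre_; no recursion, no walk):
-- in direction (dx,dy): the cell behind the start is a blank; then either the cell one step out is
-- not an on-board blank and the four cells at +1..+4 read tile,blank,tile,blank, or it is a blank
-- and at some distance sp ≥ 1 the cells at offsets 2..sp+1 are on-board non-blanks of which exactly
-- the last and one other equal tile, followed by an on-board blank at offset sp+2.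
def rayHitP (board : List (List String)) (tile : String) (xs ys dx dy : Int) (sp : Nat) : Bool :=
  decide (1 ≤ sp)
    && ((List.range sp).all fun j =>
          ((getOpt board (xs + ((j : Int) + 2) * dx) (ys + ((j : Int) + 2) * dy)).isSome
            && !(getOpt board (xs + ((j : Int) + 2) * dx) (ys + ((j : Int) + 2) * dy) == some " ")))
    && (getOpt board (xs + ((sp : Int) + 2) * dx) (ys + ((sp : Int) + 2) * dy) == some " ")
    && (getOpt board (xs + ((sp : Int) + 1) * dx) (ys + ((sp : Int) + 1) * dy) == some tile)
    && (((List.range (sp - 1)).countP fun j =>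
          getOpt board (xs + ((j : Int) + 2) * dx) (ys + ((j : Int) + 2) * dy) == some tile) == 1)

def dirHitP (board : List (List String)) (tile : String) (xs ys dx dy : Int) : Bool :=
  (getOpt board (xs - dx) (ys - dy) == some " ")
    && (if getOpt board (xs + dx) (ys + dy) == some " " then
          (List.range 15).any fun k => rayHitP board tile xs ys dx dy (k + 1)
        else
          (getOpt board (xs + dx) (ys + dy) == some tile)
            && (getOpt board (xs + 2 * dx) (ys + 2 * dy) == some " ")
            && (getOpt board (xs + 3 * dx) (ys + 3 * dy) == some tile)
            && (getOpt board (xs + 4 * dx) (ys + 4 * dy) == some " "))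

def patternPresent (board : List (List String)) (tile : String) (xs ys : Int) : Bool :=
  dirsL.any fun d => dirHitP board tile xs ys d.1 d.2

-- Pre_ keeps the inputs the first-line guard rejects (A returns False) and the scans — on the full
-- 15×15 board A assumes, with a real stone tile ≠ ' ' — that end in a detected pattern (A returns
-- True).  It excludes: patternless scans, on which A falls off its loop and returns None (not a
-- value of the declared Bool type); scans over boards smaller than 15×15, on which A's in-bounds
-- indexing raises IndexError; and the degenerate calls with tile = ' ', a search for the blank
-- marker itself that no game ever makes and on which either answer is as defensible as the other.
def Pre_OneIf2 (board : List (List String)) (tile : String) (xstart : Int) (ystart : Int) : Prop :=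
  ((PySem.List.pyGet? board xstart).bind (fun r => PySem.List.pyGet? r ystart)).isSome = true ∧
  (¬ (((PySem.List.pyGet? board xstart).bind (fun r => PySem.List.pyGet? r ystart)).getD "" = " "
        ∧ isOnBoardL xstart ystart = true)
    ∨ (tile ≠ " " ∧ board.length = 15 ∧ (board.all fun row => row.length == 15) = true
        ∧ patternPresent board tile xstart ystart = true))

instance (board : List (List String)) (tile : String) (xstart : Int) (ystart : Int) : Decidable (Pre_OneIf2 board tile xstart ystart) := by
  unfold Pre_OneIf2; infer_instance

def pvWitness_OneIf2 : List (List String) × String × Int × Int := ([["x"]], "x", 0, 0)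

def Spec_OneIf2 (board : List (List String)) (tile : String) (xstart : Int) (ystart : Int) (out : Bool) : Prop := out = OneIf2_alt board tile xstart ystart
instance (board : List (List String)) (tile : String) (xstart : Int) (ystart : Int) (out : Bool) : Decidable (Spec_OneIf2 board tile xstart ystart out) := by unfold Spec_OneIf2; infer_instance

-- ===== CLAIM (what is proved, stated in full; the proofs are below) =====
def Claim_equal_OneIf2 : Prop := ∀ (board : List (List String)) (tile : String) (xstart : Int) (ystart : Int), Dom_OneIf2 board tile xstart ystart → Pre_OneIf2 board tile xstart ystart → Spec_OneIf2 board tile xstart ystart (OneIf2 board tile xstart ystart)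

-- ===== LEMMAS AND PROOFS =====
-- (the equality A = B is in fact proved on ALL inputs with tile ≠ " "; Pre_'s pattern clause is
-- used only to supply tile ≠ " " — the rest of Pre_ scopes the behavioural claim, since outside it
-- the Pythons raise or return None where the typed ports return a Bool)

-- proof-only mirror of loopA over the collected ray
def walkW (board : List (List String)) (tile : String) (dx dy : Int) :
    Int → Int → Int → List String → Bool × Int × Int
  | _, x, y, [] => (false, x + dx, y + dy)
  | n, x, y, c :: rest =>
    if c == " " then (false, x + dx, y + dy)
    else if c == tile then
      if (rest.head? == some " ") && (n + 1 == 2) then (true, x + dx, y + dy)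
      else walkW board tile dx dy (n + 1) (x + dx) (y + dy) rest
    else walkW board tile dx dy n (x + dx) (y + dy) rest

-- first-space position of a ray, len if none (Source B's sp)
def spIdx (r : List String) : Nat := (PySem.List.index? r " ").getD r.length

theorem spIdx_nil : spIdx [] = 0 := by
  simp [spIdx, PySem.List.index?]

theorem spIdx_cons_space (r : List String) : spIdx (" " :: r) = 0 := by
  unfold spIdx
  rw [PySem.List.index?_cons_self]
  simp

theorem spIdx_cons_of_ne (c : String) (r : List String) (h : (c == " ") = false) :
    spIdx (c :: r) = spIdx r + 1 := by
  unfold spIdx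
  rw [PySem.List.index?_cons_of_ne r (show c ≠ " " by simpa using h)]
  cases hi : PySem.List.index? r " " with
  | none => simp
  | some k => simp

theorem loopA_eq_walkW (board : List (List String)) (tile : String) (dx dy : Int) :
    ∀ (f : Nat) (x y n : Int), isOnBoardL x y = true →
      (∀ k : Nat, f + 1 ≤ k → isOnBoardL (x + k * dx) (y + k * dy) = false) →
      loopA board tile dx dy (f + 1) x y n
        = walkW board tile dx dy n x y (rayB board dx dy f (x + dx) (y + dy)) := by
  intro f
  induction f with
  | zero =>
    intro x y n hxy H
    have h1 : isOnBoardL (x + dx) (y + dy) = false := by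
      have := H 1 (by omega)
      simpa using this
    simp [loopA, rayB, walkW, hxy, h1]
  | succ f ih =>
    intro x y n hxy H
    by_cases h1 : isOnBoardL (x + dx) (y + dy) = true
    · -- the ray starts with the cell one step out
      have hray : rayB board dx dy (f + 1) (x + dx) (y + dy)
          = cellD board (x + dx) (y + dy) :: rayB board dx dy f (x + dx + dx) (y + dy + dy) := by
        simp [rayB, h1]
      have H' : ∀ k : Nat, f + 1 ≤ k →
          isOnBoardL (x + dx + k * dx) (y + dy + k * dy) = false := by
        intro k hk
        have := H (k + 1) (by omega)
        have ex : x + ((k : Int) + 1) * dx = x + dx + k * dx := by ring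
        have ey : y + ((k : Int) + 1) * dy = y + dy + k * dy := by ring
        simpa [Nat.cast_add, Nat.cast_one, ex, ey] using this
      have hh : ((rayB board dx dy f (x + dx + dx) (y + dy + dy)).head? == some " ")
          = (isOnBoardL (x + dx + dx) (y + dy + dy) && (cellD board (x + dx + dx) (y + dy + dy) == " ")) := by
        cases f with
        | zero =>
          have h2 : isOnBoardL (x + dx + dx) (y + dy + dy) = false := by
            have := H' 1 (by omega)
            simpa using this
          simp [rayB, h2]
        | succ g =>
          by_cases h2 : isOnBoardL (x + dx + dx) (y + dy + dy) = true
          · simp [rayB, h2]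
          · have h2' : isOnBoardL (x + dx + dx) (y + dy + dy) = false := by simpa using h2
            simp [rayB, h2']
      rw [hray]
      by_cases hsp : (cellD board (x + dx) (y + dy) == " ") = true
      · simp [loopA, walkW, hxy, h1, hsp]
      · by_cases htl : (cellD board (x + dx) (y + dy) == tile) = true
        · cases hret : (isOnBoardL (x + dx + dx) (y + dy + dy)
              && (n + 1 == 2) && (cellD board (x + dx + dx) (y + dy + dy) == " ")) with
          | true =>
            have hret' : (((rayB board dx dy f (x + dx + dx) (y + dy + dy)).head? == some " ")
                && (n + 1 == 2)) = true := by
              rw [hh]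
              rw [Bool.and_right_comm] at hret
              exact hret
            simp [loopA, walkW, hxy, h1, hsp, htl, hret, hret']
          | false =>
            have hret' : (((rayB board dx dy f (x + dx + dx) (y + dy + dy)).head? == some " ")
                && (n + 1 == 2)) = false := by
              rw [hh]
              rw [Bool.and_right_comm] at hret
              exact hret
            have hrec := ih (x + dx) (y + dy) (n + 1) h1 H'
            simp only [loopA, walkW, hxy, h1, hsp, htl, hret, hret', if_true, if_false,
              Bool.false_eq_true, Bool.and_false] at hrec ⊢
            simpa using hrec
        · have hrec := ih (x + dx) (y + dy) n h1 H'
          simp only [loopA, walkW, hxy, h1, hsp, htl, if_true, if_false,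
            Bool.false_eq_true, Bool.and_false] at hrec ⊢
          simpa using hrec
    · have h1' : isOnBoardL (x + dx) (y + dy) = false := by simpa using h1
      simp [loopA, rayB, walkW, hxy, h1']

theorem rayB_fuel_succ (board : List (List String)) (dx dy : Int) :
    ∀ (f : Nat) (x y : Int),
      (∀ k : Nat, f ≤ k → isOnBoardL (x + k * dx) (y + k * dy) = false) →
      rayB board dx dy (f + 1) x y = rayB board dx dy f x y := by
  intro f
  induction f with
  | zero =>
    intro x y h
    have h0 := h 0 (le_refl 0)
    simp only [Nat.cast_zero, zero_mul, add_zero] at h0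
    simp [rayB, h0]
  | succ g ih =>
    intro x y h
    by_cases hx : isOnBoardL x y = true
    · simp only [rayB, hx, if_true, List.cons.injEq, true_and]
      apply ih
      intro k hk
      have := h (k + 1) (by omega)
      simpa [add_mul, mul_comm, add_assoc, add_comm, add_left_comm, mul_add] using this
    · simp [rayB, hx]

-- a ray shorter than its fuel ended at an off-board cell
theorem rayB_stop (board : List (List String)) (dx dy : Int) :
    ∀ (f : Nat) (x y : Int), (rayB board dx dy f x y).length < f →
      isOnBoardL (x + (rayB board dx dy f x y).length * dx) (y + (rayB board dx dy f x y).length * dy) = false := by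
  intro f
  induction f with
  | zero => intro x y h; omega
  | succ g ih =>
    intro x y h
    by_cases hx : isOnBoardL x y = true
    · simp only [rayB, hx, if_true, List.length_cons] at h ⊢
      have := ih (x + dx) (y + dy) (by omega)
      simpa [add_mul, one_mul, add_assoc, add_comm, add_left_comm] using this
    · have hx' : isOnBoardL x y = false := by simpa using hx
      simp [rayB, hx']

-- a ray cell read back as the board cell at its offset
theorem rayB_getD (board : List (List String)) (dx dy : Int) :
    ∀ (f : Nat) (x y : Int) (k : Nat), k < (rayB board dx dy f x y).length →
      (rayB board dx dy f x y).getD k "" = cellD board (x + k * dx) (y + k * dy) := by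
  intro f
  induction f with
  | zero => intro x y k h; simp [rayB] at h
  | succ g ih =>
    intro x y k h
    by_cases hx : isOnBoardL x y = true
    · simp only [rayB, hx, if_true, List.length_cons] at h ⊢
      cases k with
      | zero => simp
      | succ j =>
        have := ih (x + dx) (y + dy) j (by omega)
        rw [List.getD_cons_succ, this]
        have ex : x + dx + (j : Int) * dx = x + ((j : Int) + 1) * dx := by ring
        have ey : y + dy + (j : Int) * dy = y + ((j : Int) + 1) * dy := by ring
        rw [ex, ey]
        norm_num
    · have hx' : isOnBoardL x y = false := by simpa using hx
      simp [rayB, hx'] at h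

-- boolean part of the walk = Source B's first-space / slice-count condition
theorem walkW_fst (board : List (List String)) (tile : String) (dx dy : Int) :
    ∀ (r : List String) (x y n : Int),
      (walkW board tile dx dy n x y r).1
        = (decide (1 ≤ spIdx r) && decide (spIdx r < r.length) && (r.getD (spIdx r - 1) "" == tile)
            && decide ((n + (PySem.List.count (r.take (spIdx r - 1)) tile : Int)) = 1)) := by
  intro r
  induction r with
  | nil =>
    intro x y n
    simp [walkW, spIdx_nil]
  | cons c rest ih =>
    intro x y n
    simp only [PySem.List.count_eq] at ih ⊢
    by_cases hspc : (c == " ") = true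
    · have hc : c = " " := by simpa using hspc
      subst hc
      simp [walkW, spIdx_cons_space]
    · have hsp' : (c == " ") = false := by simpa using hspc
      rw [spIdx_cons_of_ne c rest hsp']
      by_cases htl : (c == tile) = true
      · cases rest with
        | nil =>
          by_cases hn : (n + 1 == 2) = true
          · simp [walkW, hsp', htl, hn, spIdx_nil]
          · simp [walkW, hsp', htl, hn, spIdx_nil]
        | cons r0 rs =>
          by_cases hr0 : (r0 == " ") = true
          · have hr0' : r0 = " " := by simpa using hr0
            subst hr0'
            rw [spIdx_cons_space]
            by_cases hn : (n + 1 == 2) = true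
            · have hn' : n = 1 := by have := beq_iff_eq.mp hn; omega
              simp [walkW, hsp', htl, hn']
            · have hn' : ¬ n = 1 := fun h => hn (beq_iff_eq.mpr (by omega))
              have hlhs : (walkW board tile dx dy (n + 1) (x + dx) (y + dy) (" " :: rs)).1 = false := by
                rw [ih (x + dx) (y + dy) (n + 1)]
                simp [spIdx_cons_space]
              simp [walkW, hsp', htl, hn, hn']
          · have hr0' : (r0 == " ") = false := by simpa using hr0
            have hhead : ((((r0 :: rs).head? : Option String) == some " ") && (n + 1 == 2)) = false := by
              have h0 : ((r0 :: rs).head? == (some " " : Option String)) = false := by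
                simpa [List.head?_cons] using hr0'
              rw [h0, Bool.false_and]
            have hlhs : (walkW board tile dx dy n x y (c :: r0 :: rs)).1
                = (walkW board tile dx dy (n + 1) (x + dx) (y + dy) (r0 :: rs)).1 := by
              conv_lhs => rw [walkW]
              simp only [hsp', htl, hhead, Bool.false_eq_true, if_false, if_true]
            rw [hlhs, ih (x + dx) (y + dy) (n + 1)]
            rw [spIdx_cons_of_ne r0 rs hr0']
            rw [Bool.eq_iff_iff]
            simp only [Nat.add_sub_cancel, List.length_cons, List.getD_cons_succ,
              List.take_succ_cons, List.count_cons, htl, if_true, Bool.and_eq_true,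
              decide_eq_true_eq, beq_iff_eq, and_assoc]
            constructor
            · rintro ⟨h1, h2, h3, h4⟩
              exact ⟨by omega, by omega, h3, by push_cast at h4 ⊢; omega⟩
            · rintro ⟨h1, h2, h3, h4⟩
              exact ⟨by omega, by omega, h3, by push_cast at h4 ⊢; omega⟩
      · have htl' : (c == tile) = false := by simpa using htl
        have hlhs : (walkW board tile dx dy n x y (c :: rest)).1
            = (walkW board tile dx dy n (x + dx) (y + dy) rest).1 := by
          conv_lhs => rw [walkW]
          simp only [hsp', htl', Bool.false_eq_true, if_false]
        rw [hlhs, ih (x + dx) (y + dy) n]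
        rcases rest with _ | ⟨r0, rs⟩
        · simp [spIdx_nil, htl']
        · by_cases hr0 : (r0 == " ") = true
          · have hr0' : r0 = " " := by simpa using hr0
            subst hr0'
            rw [spIdx_cons_space]
            simp [htl']
          · have hr0' : (r0 == " ") = false := by simpa using hr0
            rw [spIdx_cons_of_ne r0 rs hr0']
            rw [Bool.eq_iff_iff]
            simp only [Nat.add_sub_cancel, List.length_cons, List.getD_cons_succ,
              List.take_succ_cons, List.count_cons, htl', Bool.false_eq_true, if_false,
              add_zero, Bool.and_eq_true, decide_eq_true_eq, beq_iff_eq, and_assoc]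
            constructor
            · rintro ⟨h1, h2, h3, h4⟩
              exact ⟨by omega, by omega, h3, h4⟩
            · rintro ⟨h1, h2, h3, h4⟩
              exact ⟨by omega, by omega, h3, h4⟩

-- exit coordinates of a walk that did not return True
theorem walkW_snd (board : List (List String)) (tile : String) (dx dy : Int) :
    ∀ (r : List String) (x y n : Int), (walkW board tile dx dy n x y r).1 = false →
      (walkW board tile dx dy n x y r).2 = (x + (spIdx r + 1) * dx, y + (spIdx r + 1) * dy) := by
  intro r
  induction r with
  | nil =>
    intro x y n _
    simp [walkW, spIdx_nil]
  | cons c rest ih =>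
    intro x y n hfst
    by_cases hsp : (c == " ") = true
    · have hc : c = " " := by simpa using hsp
      subst hc
      simp [walkW, spIdx_cons_space]
    · have hsp' : (c == " ") = false := by simpa using hsp
      rw [spIdx_cons_of_ne c rest hsp']
      by_cases htl : (c == tile) = true
      · by_cases hret : ((rest.head? == some " ") && (n + 1 == 2)) = true
        · exfalso
          simp [walkW, hsp', htl, hret] at hfst
        · have hret' : ((rest.head? == some " ") && (n + 1 == 2)) = false := by simpa using hret
          have hfst' : (walkW board tile dx dy (n + 1) (x + dx) (y + dy) rest).1 = false := by
            simpa [walkW, hsp', htl, hret'] using hfst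
          have := ih (x + dx) (y + dy) (n + 1) hfst'
          simp only [walkW, hsp', htl, hret', if_false, if_true, Bool.false_eq_true] at this ⊢
          rw [this]
          simp only [Prod.mk.injEq]
          exact ⟨by push_cast; ring, by push_cast; ring⟩
      · have htl' : (c == tile) = false := by simpa using htl
        have hfst' : (walkW board tile dx dy n (x + dx) (y + dy) rest).1 = false := by
          simpa [walkW, hsp', htl'] using hfst
        have := ih (x + dx) (y + dy) n hfst'
        simp only [walkW, hsp', htl', if_false, Bool.false_eq_true] at this ⊢
        rw [this]
        simp only [Prod.mk.injEq]
        exact ⟨by push_cast; ring, by push_cast; ring⟩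

-- off the board after ≥ 16 steps in any of the eight directions
theorem horizon (xs ys dx dy : Int) (hmem : (dx, dy) ∈ dirsL) (h : isOnBoardL xs ys = true) :
    ∀ j : Nat, 16 ≤ j → isOnBoardL (xs + j * dx) (ys + j * dy) = false := by
  intro j hj
  simp only [isOnBoardL, Bool.and_eq_true, decide_eq_true_eq] at h
  simp only [dirsL, List.mem_cons, Prod.mk.injEq, List.not_mem_nil, or_false] at hmem
  have hj' : (16 : Int) ≤ (j : Int) := by exact_mod_cast hj
  rcases hmem with ⟨h1, h2⟩ | ⟨h1, h2⟩ | ⟨h1, h2⟩ | ⟨h1, h2⟩ | ⟨h1, h2⟩ | ⟨h1, h2⟩ | ⟨h1, h2⟩ | ⟨h1, h2⟩ <;>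
    subst h1 <;> subst h2 <;>
    · simp only [isOnBoardL, Bool.and_eq_false_iff, decide_eq_false_iff_not, not_le]
      omega

theorem rayB_len_le (board : List (List String)) (dx dy : Int) :
    ∀ (f : Nat) (x y : Int), (rayB board dx dy f x y).length ≤ f := by
  intro f
  induction f with
  | zero => intro x y; simp [rayB]
  | succ g ih =>
    intro x y
    by_cases hx : isOnBoardL x y = true
    · simpa [rayB, hx] using ih (x + dx) (y + dy)
    · have hx' : isOnBoardL x y = false := by simpa using hx
      simp [rayB, hx']

theorem getOpt_beq (board : List (List String)) (x y : Int) (s : String) :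
    (getOpt board x y == some s) = (isOnBoardL x y && (cellD board x y == s)) := by
  by_cases h : isOnBoardL x y = true
  · simp [getOpt, h]
  · have h' : isOnBoardL x y = false := by simpa using h
    simp [getOpt, h']

-- A's stepwise post-loop chain, read as Source B's four-cell conjunction
theorem chain_eq_conj (board : List (List String)) (tile : String) (x y dx dy : Int) :
    (if isOnBoardL x y && (cellD board x y == tile) then
      if isOnBoardL (x + dx) (y + dy) && (cellD board (x + dx) (y + dy) == " ") then
        if isOnBoardL (x + dx + dx) (y + dy + dy) && (cellD board (x + dx + dx) (y + dy + dy) == tile) then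
          isOnBoardL (x + dx + dx + dx) (y + dy + dy + dy) && (cellD board (x + dx + dx + dx) (y + dy + dy + dy) == " ")
        else false
      else false
    else false)
    = ((getOpt board x y == some tile) && (getOpt board (x + dx) (y + dy) == some " ")
        && (getOpt board (x + 2 * dx) (y + 2 * dy) == some tile)
        && (getOpt board (x + 3 * dx) (y + 3 * dy) == some " ")) := by
  have e2x : x + 2 * dx = x + dx + dx := by ring
  have e2y : y + 2 * dy = y + dy + dy := by ring
  have e3x : x + 3 * dx = x + dx + dx + dx := by ring
  have e3y : y + 3 * dy = y + dy + dy + dy := by ring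
  simp only [getOpt_beq, e2x, e2y, e3x, e3y]
  cases h1 : (isOnBoardL x y && (cellD board x y == tile)) <;>
    cases h2 : (isOnBoardL (x + dx) (y + dy) && (cellD board (x + dx) (y + dy) == " ")) <;>
      cases h3 : (isOnBoardL (x + dx + dx) (y + dy + dy) && (cellD board (x + dx + dx) (y + dy + dy) == tile)) <;>
        simp

theorem dirBody_eq (board : List (List String)) (tile : String) (xs ys dx dy : Int)
    (hmem : (dx, dy) ∈ dirsL) (h : isOnBoardL xs ys = true) (htile : tile ≠ " ") :
    dirBodyA board tile xs ys dx dy = dirBodyB board tile xs ys dx dy := by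
  have Hj := horizon xs ys dx dy hmem h
  have hst : (" " == tile) = false := by
    simpa using fun e => htile e.symm
  unfold dirBodyA dirBodyB
  rw [getOpt_beq]
  cases hg : (isOnBoardL (xs - dx) (ys - dy) && (cellD board (xs - dx) (ys - dy) == " ")) with
  | false => simp
  | true =>
    rw [getOpt_beq]
    cases hc1 : (isOnBoardL (xs + dx) (ys + dy) && (cellD board (xs + dx) (ys + dy) == " ")) with
    | false =>
      simp only [Bool.not_true, if_true, if_false, Bool.false_eq_true]
      rw [show xs + 2 * dx = xs + dx + dx from by ring,
          show ys + 2 * dy = ys + dy + dy from by ring,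
          show xs + 3 * dx = xs + dx + 2 * dx from by ring,
          show ys + 3 * dy = ys + dy + 2 * dy from by ring,
          show xs + 4 * dx = xs + dx + 3 * dx from by ring,
          show ys + 4 * dy = ys + dy + 3 * dy from by ring]
      exact chain_eq_conj board tile (xs + dx) (ys + dy) dx dy
    | true =>
      have honb1 : isOnBoardL (xs + dx) (ys + dy) = true := (Bool.and_eq_true_iff.mp hc1).1
      have exy : xs + 2 * dx = xs + dx + dx := by ring
      have eyy : ys + 2 * dy = ys + dy + dy := by ring
      have H15 : ∀ k : Nat, 15 ≤ k →
          isOnBoardL (xs + dx + dx + k * dx) (ys + dy + dy + k * dy) = false := by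
        intro k hk
        have hthis := Hj (k + 2) (by omega)
        have ex : xs + ((k : Int) + 2) * dx = xs + dx + dx + k * dx := by ring
        have ey : ys + ((k : Int) + 2) * dy = ys + dy + dy + k * dy := by ring
        simpa [Nat.cast_add, Nat.cast_ofNat, ex, ey] using hthis
      have H16 : ∀ k : Nat, 15 + 1 ≤ k →
          isOnBoardL (xs + dx + k * dx) (ys + dy + k * dy) = false := by
        intro k hk
        have hthis := Hj (k + 1) (by omega)
        have ex : xs + ((k : Int) + 1) * dx = xs + dx + k * dx := by ring
        have ey : ys + ((k : Int) + 1) * dy = ys + dy + k * dy := by ring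
        simpa [Nat.cast_add, Nat.cast_one, ex, ey] using hthis
      have hloop := loopA_eq_walkW board tile dx dy 15 (xs + dx) (ys + dy) 0 honb1 H16
      have hray : rayB board dx dy 16 (xs + 2 * dx) (ys + 2 * dy)
          = rayB board dx dy 15 (xs + dx + dx) (ys + dy + dy) := by
        rw [exy, eyy]
        exact rayB_fuel_succ board dx dy 15 _ _ H15
      simp only [Bool.not_true, if_true, if_false, Bool.false_eq_true]
      rw [show (16 : Nat) = 15 + 1 from rfl, hloop, hray]
      set r := rayB board dx dy 15 (xs + dx + dx) (ys + dy + dy) with hrdef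
      have hfst := walkW_fst board tile dx dy r (xs + dx) (ys + dy) 0
      have hcnt : decide (((0 : Int) + (PySem.List.count (r.take (spIdx r - 1)) tile : Int)) = 1)
          = (PySem.List.count (r.take (spIdx r - 1)) tile == 1) := by
        rw [Bool.eq_iff_iff]
        simp only [decide_eq_true_eq, beq_iff_eq]
        omega
      rw [hcnt] at hfst
      cases hidx : PySem.List.index? r " " with
      | some sp =>
        rcases PySem.List.getElem_of_index?_eq_some hidx with ⟨hsplen, hspval, -⟩
        have hspeq : spIdx r = sp := by unfold spIdx; rw [hidx]; rfl
        rw [hspeq] at hfst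
        have hlt : decide (sp < r.length) = true := by simpa using hsplen
        rw [hlt, Bool.and_true] at hfst
        cases hb : (decide (1 ≤ sp) && (r.getD (sp - 1) "" == tile)
            && (PySem.List.count (r.take (sp - 1)) tile == 1)) with
        | true =>
          have hw : (walkW board tile dx dy 0 (xs + dx) (ys + dy) r).1 = true := by
            rw [hfst]; exact hb
          simp only [PySem.List.count_eq, List.getD_eq_getElem?_getD] at hb
          simp at hb
          simp [hw]
          tauto
        | false =>
          have hfst0 : (walkW board tile dx dy 0 (xs + dx) (ys + dy) r).1 = false := by
            rw [hfst]; exact hb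
          have hsnd := walkW_snd board tile dx dy r (xs + dx) (ys + dy) 0 hfst0
          rw [hspeq] at hsnd
          have hcell : cellD board (xs + dx + ((sp : Int) + 1) * dx) (ys + dy + ((sp : Int) + 1) * dy) = " " := by
            have hget := rayB_getD board dx dy 15 (xs + dx + dx) (ys + dy + dy) sp (by rw [← hrdef]; omega)
            rw [← hrdef] at hget
            have hgd : r.getD sp "" = " " := by
              rw [List.getD_eq_getElem r "" hsplen, hspval]
            have ex : xs + dx + dx + (sp : Int) * dx = xs + dx + ((sp : Int) + 1) * dx := by ring
            have ey : ys + dy + dy + (sp : Int) * dy = ys + dy + ((sp : Int) + 1) * dy := by ring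
            rw [← ex, ← ey, ← hget, hgd]
          have hchain : (cellD board (xs + dx + ((sp : Int) + 1) * dx) (ys + dy + ((sp : Int) + 1) * dy) == tile) = false := by
            rw [hcell, hst]
          simp only [PySem.List.count_eq, List.getD_eq_getElem?_getD] at hb
          simp at hb
          simp [hfst0, hsnd, hchain]
          tauto
      | none =>
        have hspeq : spIdx r = r.length := by unfold spIdx; rw [hidx]; rfl
        have hfst0 : (walkW board tile dx dy 0 (xs + dx) (ys + dy) r).1 = false := by
          rw [hfst, hspeq]
          simp
        have hsnd := walkW_snd board tile dx dy r (xs + dx) (ys + dy) 0 hfst0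
        rw [hspeq] at hsnd
        have hoff : isOnBoardL (xs + dx + ((r.length : Int) + 1) * dx)
            (ys + dy + ((r.length : Int) + 1) * dy) = false := by
          have hle := rayB_len_le board dx dy 15 (xs + dx + dx) (ys + dy + dy)
          rw [← hrdef] at hle
          have ex : xs + dx + ((r.length : Int) + 1) * dx = xs + dx + dx + (r.length : Int) * dx := by ring
          have ey : ys + dy + ((r.length : Int) + 1) * dy = ys + dy + dy + (r.length : Int) * dy := by ring
          rw [ex, ey]
          rcases Nat.lt_or_ge r.length 15 with hl | hl
          · have := rayB_stop board dx dy 15 (xs + dx + dx) (ys + dy + dy) (by rw [← hrdef]; omega)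
            rw [← hrdef] at this
            exact this
          · have hl15 : r.length = 15 := by omega
            rw [hl15]
            exact H15 15 (le_refl 15)
        simp [hfst0, hsnd, hoff]

theorem any_congr_mem {α : Type} (l : List α) (f g : α → Bool) (h : ∀ a ∈ l, f a = g a) :
    l.any f = l.any g := by
  induction l with
  | nil => rfl
  | cons a t ih =>
    simp only [List.any_cons, h a (by simp), ih (fun b hb => h b (by simp [hb]))]

-- ===== VERDICT (by name: the statement is the Claim_ definition above) =====
theorem OneIf2_spec : Claim_equal_OneIf2 := by
  intro board tile xstart ystart _ hpre
  unfold Spec_OneIf2 OneIf2 OneIf2_alt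
  cases hg : (PySem.List.pyGet? board xstart).bind (fun r => PySem.List.pyGet? r ystart) with
  | none => rfl
  | some c =>
    cases hB : (c != " " || !isOnBoardL xstart ystart) with
    | true => simp [hB]
    | false =>
      simp only [hB, Bool.false_eq_true, if_false]
      have honb : isOnBoardL xstart ystart = true := by
        rcases Bool.or_eq_false_iff.mp hB with ⟨-, h2⟩
        simpa using h2
      have hc : c = " " := by
        rcases Bool.or_eq_false_iff.mp hB with ⟨h1, -⟩
        simpa using h1
      have htile : tile ≠ " " := by
        rcases hpre with ⟨-, hpre2⟩
        rcases hpre2 with hguard | ⟨ht, -⟩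
        · exact absurd ⟨by simp [hg, hc], honb⟩ hguard
        · exact ht
      exact any_congr_mem _ _ _ (fun p hp =>
        dirBody_eq board tile xstart ystart p.1 p.2 (by simpa using hp) honb htile)
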